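-- pv_equiv track=rewrite | github.com/omarelsewify/Projects | CS106A Programming Methodology/crypto/crypto.py | compute_slug
-- ===== SOURCE A (Python) =====
-- ALPHABET = ['a', 'b', 'c', 'd', 'e', 'f', 'g', 'h', 'i', 'j', 'k', 'l', 'm', 'n', 'o', 'p', 'q', 'r', 's', 't', 'u',
--             'v', 'w', 'x', 'y', 'z']
--
-- def compute_slug(key):
--     """
--     Given a key string, compute and return the len-26 slug list for it.
--     >>> compute_slug('z')
--     ['z', 'a', 'b', 'c', 'd', 'e', 'f', 'g', 'h', 'i', 'j', 'k', 'l', 'm', 'n', 'o', 'p', 'q', 'r', 's', 't', 'u', 'v', 'w', 'x', 'y']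
--     >>> compute_slug('Bananas!')
--     ['b', 'a', 'n', 's', 'c', 'd', 'e', 'f', 'g', 'h', 'i', 'j', 'k', 'l', 'm', 'o', 'p', 'q', 'r', 't', 'u', 'v', 'w', 'x', 'y', 'z']
--     >>> compute_slug('Life, Liberty, and')
--     ['l', 'i', 'f', 'e', 'b', 'r', 't', 'y', 'a', 'n', 'd', 'c', 'g', 'h', 'j', 'k', 'm', 'o', 'p', 'q', 's', 'u', 'v', 'w', 'x', 'z']
--     >>> compute_slug('Zounds!')
--     ['z', 'o', 'u', 'n', 'd', 's', 'a', 'b', 'c', 'e', 'f', 'g', 'h', 'i', 'j', 'k', 'l', 'm', 'p', 'q', 'r', 't', 'v', 'w', 'x', 'y']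
--     """
--     code = []
--     remainder = list.copy(ALPHABET)
--     key = key.lower()
--     # Pull out the letters used in the key and then add
--     # the remaining alphabet letters to the end of the list
--     for i in range(len(key)):
--         if key[i].isalpha() and key[i] not in code:
--             code.append(key[i])
--         if key[i] in remainder:
--             to_delete = remainder.index(key[i])
--             del remainder[to_delete]
--     return code + remainder
-- ===== SOURCE B (Python) =====
-- ALPHABET = ['a', 'b', 'c', 'd', 'e', 'f', 'g', 'h', 'i', 'j', 'k', 'l', 'm', 'n', 'o', 'p', 'q', 'r', 's', 't', 'u',
--             'v', 'w', 'x', 'y', 'z']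
--
-- def compute_slug(key):
--     code = []
--     for ch in key.lower():
--         if ch.isalpha() and ch not in code:
--             code.append(ch)
--     remainder = [c for c in ALPHABET if c not in code]
--     return code + remainder
-- ===== Notes on version B (the rewrite author's own statement) =====
-- stated objective: simpler
-- what changed: B removes the incrementally-maintained remainder list (list.copy / membership / index / del on every key character) and instead builds the distinct-letter code in a single pass over key.lower(), then computes the tail once as a filter of ALPHABET against code.
import Mathlib
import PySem

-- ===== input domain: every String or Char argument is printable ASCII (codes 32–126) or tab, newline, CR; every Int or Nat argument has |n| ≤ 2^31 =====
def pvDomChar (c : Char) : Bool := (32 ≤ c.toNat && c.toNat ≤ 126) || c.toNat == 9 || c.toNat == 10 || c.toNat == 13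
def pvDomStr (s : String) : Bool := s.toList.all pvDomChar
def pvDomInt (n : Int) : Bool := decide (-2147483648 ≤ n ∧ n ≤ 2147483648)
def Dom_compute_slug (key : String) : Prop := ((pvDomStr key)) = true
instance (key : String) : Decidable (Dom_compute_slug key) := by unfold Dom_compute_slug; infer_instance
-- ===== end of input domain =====

-- B replaces A's incrementally-maintained remainder (copy/index/del per character) by one
-- build-code pass over key.lower() plus a single final filter of ALPHABET; objective: simpler.
-- Python chars (1-char strings) are represented as Char in both ports and turned into the
-- returned 1-char Strings only at the final `return code + remainder`.

-- ===== PORT A =====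
-- the module constant ALPHABET
def pvALPHABET : List Char :=
  ['a','b','c','d','e','f','g','h','i','j','k','l','m','n','o','p','q','r','s','t','u','v','w','x','y','z']

-- one iteration of A's loop body on the state (code, remainder)
def pvStepA (st : List Char × List Char) (ch : Char) : List Char × List Char :=
  let code := if PySem.Chars.isalpha ch = true ∧ ch ∉ st.1 then st.1 ++ [ch] else st.1
  let rem :=
    if ch ∈ st.2 then
      match PySem.List.index? st.2 ch with
      | some j => st.2.eraseIdx j      -- to_delete = remainder.index(key[i]); del remainder[to_delete]
      | none => st.2                    -- unreachable: guarded by the membership test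
    else st.2
  (code, rem)

def compute_slug (key : String) : List String :=
  let cs := (PySem.Str.lower key).toList
  let st := (PySem.List.pyRange 0 (cs.length : Int) 1).foldl
      (fun st i => pvStepA st (PySem.List.pyGetD cs i ' ')) ([], pvALPHABET)
  (st.1 ++ st.2).map (fun c => String.ofList [c])

-- ===== PORT B =====
-- one iteration of B's code-building loop
def pvStepB (code : List Char) (ch : Char) : List Char :=
  if PySem.Chars.isalpha ch = true ∧ ch ∉ code then code ++ [ch] else code

def compute_slug_alt (key : String) : List String :=
  let code := (PySem.Str.lower key).toList.foldl pvStepB []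
  let remainder := pvALPHABET.filter (fun c => c ∉ code)
  (code ++ remainder).map (fun c => String.ofList [c])

-- ===== PRECONDITION & SPEC =====
def Spec_compute_slug (key : String) (out : List String) : Prop := out = compute_slug_alt key
instance (key : String) (out : List String) : Decidable (Spec_compute_slug key out) := by unfold Spec_compute_slug; infer_instance

-- ===== CLAIM (what is proved, stated in full; the proofs are below) =====
def Claim_equal_compute_slug : Prop := ∀ (key : String), Dom_compute_slug key → Spec_compute_slug key (compute_slug key)

-- ===== LEMMAS AND PROOFS =====

lemma pv_alpha_of_mem (c : Char) (h : c ∈ pvALPHABET) : PySem.Chars.isalpha c = true := by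
  fin_cases h <;> decide

lemma pv_alpha_nodup : pvALPHABET.Nodup := by decide

-- A's guarded index-then-delete on a duplicate-free list is a filter by ≠ ch
lemma pv_del (l : List Char) (ch : Char) (hnd : l.Nodup) :
    (if ch ∈ l then
        match PySem.List.index? l ch with
        | some j => l.eraseIdx j
        | none => l
      else l) = l.filter (fun c => c ≠ ch) := by
  induction l with
  | nil => simp
  | cons x xs ih =>
    rcases List.nodup_cons.mp hnd with ⟨hx, hxs⟩
    by_cases hxc : x = ch
    · subst hxc
      rw [if_pos (List.mem_cons_self ..), PySem.List.index?_cons_self]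
      show xs = List.filter (fun c => decide (c ≠ x)) (x :: xs)
      rw [List.filter_cons_of_neg (by simp)]
      exact (List.filter_eq_self.mpr
        (fun a ha => by simp only [decide_eq_true_eq]; rintro rfl; exact hx ha)).symm
    · rw [PySem.List.index?_cons_of_ne xs hxc]
      by_cases hm : ch ∈ xs
      · rcases Option.isSome_iff_exists.mp ((PySem.List.index?_isSome_iff xs ch).mpr hm) with ⟨j, hj⟩
        rw [if_pos (List.mem_cons_of_mem _ hm), hj]
        have := ih hxs
        rw [if_pos hm, hj] at this
        have hfc : List.filter (fun c => decide (c ≠ ch)) (x :: xs)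
            = x :: List.filter (fun c => decide (c ≠ ch)) xs :=
          List.filter_cons_of_pos (by simpa using hxc)
        rw [Option.map_some, hfc]
        exact congrArg (x :: ·) this
      · have hnc : ch ∉ x :: xs := by
          simp only [List.mem_cons, not_or]
          exact ⟨fun h => hxc h.symm, hm⟩
        rw [if_neg hnc]
        exact (List.filter_eq_self.mpr
          (fun a ha => by simp only [decide_eq_true_eq]; rintro rfl; exact hnc ha)).symm

-- A's loop body preserves the invariant "remainder = ALPHABET filtered against code"
lemma pv_step (code : List Char) (ch : Char) :
    pvStepA (code, pvALPHABET.filter (fun c => c ∉ code)) ch =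
      (pvStepB code ch, pvALPHABET.filter (fun c => c ∉ pvStepB code ch)) := by
  have hnd : (pvALPHABET.filter (fun c => c ∉ code)).Nodup := pv_alpha_nodup.filter _
  unfold pvStepA pvStepB
  dsimp only
  refine Prod.ext rfl ?_
  dsimp only
  show (if ch ∈ pvALPHABET.filter (fun c => c ∉ code) then
      match PySem.List.index? (pvALPHABET.filter (fun c => c ∉ code)) ch with
      | some j => (pvALPHABET.filter (fun c => c ∉ code)).eraseIdx j
      | none => pvALPHABET.filter (fun c => c ∉ code)
    else pvALPHABET.filter (fun c => c ∉ code)) = _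
  rw [pv_del _ _ hnd, List.filter_filter]
  by_cases hb : PySem.Chars.isalpha ch = true ∧ ch ∉ code
  · rw [if_pos hb]
    refine List.filter_congr (fun c hc => ?_)
    simp [List.mem_append, Bool.and_comm]
  · rw [if_neg hb]
    refine List.filter_congr (fun c hc => ?_)
    have hca := pv_alpha_of_mem c hc
    by_cases hcc : c ∈ code
    · simp [hcc]
    · have : c ≠ ch := by
        rintro rfl
        exact hb ⟨hca, hcc⟩
      simp [hcc, this]

lemma pv_fold (cs : List Char) (code : List Char) :
    cs.foldl pvStepA (code, pvALPHABET.filter (fun c => c ∉ code)) =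
      (cs.foldl pvStepB code, pvALPHABET.filter (fun c => c ∉ cs.foldl pvStepB code)) := by
  induction cs generalizing code with
  | nil => rfl
  | cons ch cs ih =>
      rw [List.foldl_cons, List.foldl_cons, pv_step]
      exact ih _

-- ===== VERDICT (by name: the statement is the Claim_ definition above) =====
theorem compute_slug_spec : Claim_equal_compute_slug := by
  intro key _
  unfold Spec_compute_slug
  simp only [compute_slug, compute_slug_alt]
  rw [PySem.List.foldl_pyRange_zero_pyGetD']
  have h0 : pvALPHABET = pvALPHABET.filter (fun c => c ∉ ([] : List Char)) := by decide
  rw [h0, pv_fold]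
  simp
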